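-- pv_equiv track=rewrite | github.com/mckakell/Python | mckakell_HW5.py | evenrow
-- ===== SOURCE A (Python) =====
-- def evenrow(tdlist):
--     row_sum = 0 #this acts as a counter
--     for row in tdlist:
--         #if statement says if there is no remainder count 1 for each index
--         if sum(row) % 2 == 0:
--             row_sum+= 1
--         #if there is a remainder, subtract 1 for each row that is odd
--         else:
--             row_sum-=1
--     #Since we counted 1 for each row that is even, if the counter is equal to the length of the list then we know its True.
--     if row_sum == len(tdlist):
--         return True
--     else:
--         return False
-- ===== SOURCE B (Python) =====
-- def evenrow(tdlist):
--     return all(sum(row) % 2 == 0 for row in tdlist)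
-- ===== Notes on version B (the rewrite author's own statement) =====
-- stated objective: simpler
-- what changed: Replaces the +1/-1 counter with a final length comparison by a direct short-circuiting all() over the rows' sum parity.
import Mathlib
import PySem

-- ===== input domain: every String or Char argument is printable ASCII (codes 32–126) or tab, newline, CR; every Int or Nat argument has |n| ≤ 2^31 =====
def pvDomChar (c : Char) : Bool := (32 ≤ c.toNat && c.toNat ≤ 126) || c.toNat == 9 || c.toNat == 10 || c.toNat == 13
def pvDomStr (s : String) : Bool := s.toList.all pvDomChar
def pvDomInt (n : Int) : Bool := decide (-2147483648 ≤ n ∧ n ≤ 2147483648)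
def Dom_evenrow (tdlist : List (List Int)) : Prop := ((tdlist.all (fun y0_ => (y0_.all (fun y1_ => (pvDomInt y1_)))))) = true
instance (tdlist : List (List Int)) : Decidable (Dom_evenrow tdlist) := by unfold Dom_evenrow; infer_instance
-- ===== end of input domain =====

-- B replaces A's +1/-1 counter and final length comparison by a direct short-circuiting all-rows-even test (simpler).


-- ===== PORT A =====
-- counter loop: +1 for each even-sum row, -1 otherwise; True iff counter == len(tdlist)
def evenrow (tdlist : List (List Int)) : Bool :=
  let row_sum : Int := tdlist.foldl
    (fun acc row => if PySem.Int.mod (row.foldl (· + ·) 0) 2 = 0 then acc + 1 else acc - 1) 0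
  if row_sum = (tdlist.length : Int) then true else false

-- ===== PORT B =====
-- all(sum(row) % 2 == 0 for row in tdlist)
def evenrow_alt (tdlist : List (List Int)) : Bool :=
  tdlist.all (fun row => PySem.Int.mod (row.foldl (· + ·) 0) 2 == 0)

-- ===== PRECONDITION & SPEC =====
def Spec_evenrow (tdlist : List (List Int)) (out : Bool) : Prop := out = evenrow_alt tdlist
instance (tdlist : List (List Int)) (out : Bool) : Decidable (Spec_evenrow tdlist out) := by unfold Spec_evenrow; infer_instance

-- ===== CLAIM (what is proved, stated in full; the proofs are below) =====
def Claim_equal_evenrow : Prop := ∀ (tdlist : List (List Int)), Dom_evenrow tdlist → Spec_evenrow tdlist (evenrow tdlist)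

-- ===== LEMMAS AND PROOFS =====
def pvStep (acc : Int) (row : List Int) : Int :=
  if PySem.Int.mod (row.foldl (· + ·) 0) 2 = 0 then acc + 1 else acc - 1

theorem pvFoldl_le (l : List (List Int)) : ∀ acc : Int,
    l.foldl pvStep acc ≤ acc + l.length := by
  induction l with
  | nil => intro acc; simp
  | cons h t ih =>
    intro acc
    simp only [List.foldl_cons, List.length_cons, pvStep]
    split_ifs with hc
    · have := ih (acc + 1); push_cast; omega
    · have := ih (acc - 1); push_cast; omega

theorem pvFoldl_iff (l : List (List Int)) : ∀ acc : Int,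
    (l.foldl pvStep acc = acc + l.length) ↔
      (l.all (fun row => PySem.Int.mod (row.foldl (· + ·) 0) 2 == 0)) = true := by
  induction l with
  | nil => intro acc; simp
  | cons h t ih =>
    intro acc
    simp only [List.foldl_cons, List.length_cons, List.all_cons, Bool.and_eq_true, pvStep]
    split_ifs with hc
    · have hb : (PySem.Int.mod (h.foldl (· + ·) 0) 2 == 0) = true := beq_iff_eq.mpr hc
      rw [hb]
      constructor
      · intro he
        exact ⟨rfl, (ih (acc + 1)).mp (by push_cast at he ⊢; omega)⟩
      · rintro ⟨-, ha⟩
        have := (ih (acc + 1)).mpr ha; push_cast at this ⊢; omega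
    · have hb : (PySem.Int.mod (h.foldl (· + ·) 0) 2 == 0) = false :=
        beq_eq_false_iff_ne.mpr hc
      rw [hb]
      constructor
      · intro he
        exfalso
        have := pvFoldl_le t (acc - 1); push_cast at he; omega
      · rintro ⟨h1, -⟩; cases h1

-- ===== VERDICT (by name: the statement is the Claim_ definition above) =====
theorem evenrow_spec : Claim_equal_evenrow := by
  intro tdlist _
  unfold Spec_evenrow evenrow evenrow_alt
  show (if List.foldl pvStep 0 tdlist = (tdlist.length : Int) then true else false) = _
  have h := pvFoldl_iff tdlist 0
  rw [zero_add] at h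
  by_cases hp : List.foldl pvStep 0 tdlist = (tdlist.length : Int)
  · rw [if_pos hp]; exact (h.mp hp).symm
  · rw [if_neg hp]
    exact (Bool.eq_false_iff.mpr (fun ha => hp (h.mpr ha))).symm
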